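-- pv_equiv track=rewrite | github.com/sergmiller/python_da | text_generator.py | _get_token_lines
-- ===== SOURCE A (Python) =====
-- NOT_ALPHA_DIGIT_INDEX = 2
--
-- def _get_token_lines(text):
--     tokenizers = [
--         (lambda s: s.isalpha()),
--         (lambda s: s.isdigit()),
--         (lambda s: not (s.isalpha() or s.isdigit()))
--     ]
--
--     token_lines = []
--
--     for line in text:
--         cur_token = None
--         tokens = []
--         for symb in line:
--             if cur_token is None or\
--                 tokenizers[NOT_ALPHA_DIGIT_INDEX](symb) or\
--                     not cur_token(symb):
--                 cur_token = [f for f in tokenizers if f(symb)][0]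
--                 tokens.append('')
--             tokens[-1] += symb
--         token_lines.append(tokens)
--
--     return token_lines
-- ===== SOURCE B (Python) =====
-- def _get_token_lines(text):
--     token_lines = []
--     for line in text:
--         # precompute a key per character: 0 for alpha, 1 for digit,
--         # a fresh negative sentinel per 'other' char so others never merge
--         keys = []
--         other = 0
--         for ch in line:
--             if ch.isalpha():
--                 keys.append(0)
--             elif ch.isdigit():
--                 keys.append(1)
--             else:
--                 other -= 1
--                 keys.append(other)
--         # group maximal runs of equal keys
--         pairs = list(zip(line, keys))
--         tokens = []
--         while pairs:
--             ch, k = pairs[0]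
--             rest = pairs[1:]
--             run = [ch]
--             while rest and rest[0][1] == k:
--                 run.append(rest[0][0])
--                 rest = rest[1:]
--             tokens.append(''.join(run))
--             pairs = rest
--         token_lines.append(tokens)
--     return token_lines
-- ===== Notes on version B (the rewrite author's own statement) =====
-- stated objective: alternative
-- what changed: A tracks the current tokenizer predicate in a single stateful pass and extends or opens tokens as it goes; B first precomputes a key per character (0 for alpha, 1 for digit, a fresh negative sentinel for each other char) and then groups maximal runs of equal keys into tokens.
import Mathlib
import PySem

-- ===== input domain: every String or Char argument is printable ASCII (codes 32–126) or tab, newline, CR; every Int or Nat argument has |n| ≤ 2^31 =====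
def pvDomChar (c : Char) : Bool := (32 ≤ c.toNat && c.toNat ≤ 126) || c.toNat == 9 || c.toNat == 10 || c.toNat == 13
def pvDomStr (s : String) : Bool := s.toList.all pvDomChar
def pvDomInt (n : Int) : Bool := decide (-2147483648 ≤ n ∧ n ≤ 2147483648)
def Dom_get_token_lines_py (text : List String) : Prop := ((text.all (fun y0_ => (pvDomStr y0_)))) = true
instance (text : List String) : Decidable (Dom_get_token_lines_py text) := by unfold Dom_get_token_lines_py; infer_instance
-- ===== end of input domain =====

-- B replaces A's stateful predicate-tracking single pass by a precomputed key table
-- (0 = alpha, 1 = digit, fresh negative per other char) followed by grouping of equal-key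
-- runs; alternative decomposition, not faster.

-- ===== PORT A =====
def pvATokenizers : List (Char → Bool) :=
  [fun s => PySem.Chars.isalpha s,
   fun s => PySem.Chars.isdigit s,
   fun s => !(PySem.Chars.isalpha s || PySem.Chars.isdigit s)]

def pvAStep (st : List (List Char) × Option (Char → Bool)) (symb : Char) :
    List (List Char) × Option (Char → Bool) :=
  let tokens := st.1
  let cur := st.2
  if (match cur with
      | none => true
      | some f => (pvATokenizers.getD 2 (fun _ => false)) symb || !(f symb)) then
    let cur' := (pvATokenizers.filter (fun f => f symb)).head?
    let tokens' := tokens ++ [[]]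
    (tokens'.dropLast ++ [tokens'.getLastD [] ++ [symb]], cur')
  else
    (tokens.dropLast ++ [tokens.getLastD [] ++ [symb]], cur)

def get_token_lines_py (text : List String) : List (List String) :=
  text.foldl
    (fun token_lines line =>
      token_lines ++ [((line.toList.foldl pvAStep ([], none)).1.map (fun t => String.mk t))])
    []

-- ===== PORT B =====
def pvBKeys : List Char → Int → List Int
  | [], _ => []
  | c :: cs, k =>
    if PySem.Chars.isalpha c then 0 :: pvBKeys cs k
    else if PySem.Chars.isdigit c then 1 :: pvBKeys cs k
    else (k - 1) :: pvBKeys cs (k - 1)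

def pvBGroup : List (Char × Int) → List (List Char)
  | [] => []
  | (c, j) :: zs =>
    (c :: (zs.takeWhile (fun p => p.2 == j)).map Prod.fst) ::
      pvBGroup (zs.dropWhile (fun p => p.2 == j))
termination_by l => l.length
decreasing_by
  exact Nat.lt_succ_of_le (List.length_dropWhile_le _ _)

def get_token_lines_py_alt (text : List String) : List (List String) :=
  text.map (fun line =>
    let cs := line.toList
    (pvBGroup (cs.zip (pvBKeys cs 0))).map (fun t => String.mk t))

-- ===== PRECONDITION & SPEC =====
def Spec_get_token_lines_py (text : List String) (out : List (List String)) : Prop := out = get_token_lines_py_alt text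
instance (text : List String) (out : List (List String)) : Decidable (Spec_get_token_lines_py text out) := by unfold Spec_get_token_lines_py; infer_instance

-- ===== CLAIM (what is proved, stated in full; the proofs are below) =====
def Claim_equal_get_token_lines_py : Prop := ∀ (text : List String), Dom_get_token_lines_py text → Spec_get_token_lines_py text (get_token_lines_py text)

-- ===== LEMMAS AND PROOFS =====

-- proof-side abbreviations
def pvOther (c : Char) : Bool := !(PySem.Chars.isalpha c || PySem.Chars.isdigit c)

def pvFirst (c : Char) : Option (Char → Bool) :=
  (pvATokenizers.filter (fun f => f c)).head?

def pvF (cs : List Char) : List (List Char) := (cs.foldl pvAStep ([], none)).1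

theorem pvAStep_none (tokens : List (List Char)) (c : Char) :
    pvAStep (tokens, none) c = (tokens ++ [[c]], pvFirst c) := by
  simp [pvAStep, pvFirst]

theorem pvAStep_some (tokens : List (List Char)) (f : Char → Bool) (c : Char) :
    pvAStep (tokens, some f) c =
      if pvOther c || !(f c) then (tokens ++ [[c]], pvFirst c)
      else (tokens.dropLast ++ [tokens.getLastD [] ++ [c]], some f) := by
  have e1 : pvAStep (tokens, some f) c =
      if pvOther c || !(f c) then
        ((tokens ++ [[]]).dropLast ++ [(tokens ++ [[]]).getLastD [] ++ [c]],
         (pvATokenizers.filter (fun f => f c)).head?)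
      else (tokens.dropLast ++ [tokens.getLastD [] ++ [c]], some f) := rfl
  rw [e1]
  by_cases h : (pvOther c || !(f c)) = true
  · simp [h, pvFirst]
  · simp [h]

theorem pvFirst_alpha (c : Char) (h : PySem.Chars.isalpha c = true) :
    pvFirst c = some (fun s => PySem.Chars.isalpha s) := by
  simp [pvFirst, pvATokenizers, List.filter, h]

theorem pvFirst_digit (c : Char) (h1 : PySem.Chars.isalpha c = false)
    (h2 : PySem.Chars.isdigit c = true) :
    pvFirst c = some (fun s => PySem.Chars.isdigit s) := by
  simp [pvFirst, pvATokenizers, List.filter, h1, h2]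

theorem pvFirst_other (c : Char) (h1 : PySem.Chars.isalpha c = false)
    (h2 : PySem.Chars.isdigit c = false) :
    pvFirst c = some (fun s => !(PySem.Chars.isalpha s || PySem.Chars.isdigit s)) := by
  simp [pvFirst, pvATokenizers, List.filter, h1, h2]

theorem pvFirst_isSome (c : Char) : ∃ g, pvFirst c = some g := by
  by_cases h : PySem.Chars.isalpha c = true
  · exact ⟨_, pvFirst_alpha c h⟩
  · by_cases hd : PySem.Chars.isdigit c = true
    · exact ⟨_, pvFirst_digit c (by simpa using h) hd⟩
    · exact ⟨_, pvFirst_other c (by simpa using h) (by simpa using hd)⟩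

-- prefix invariance of A's inner fold
theorem pvA_prefix (cs : List Char) : ∀ (tokens : List (List Char)) (t : List Char) (f : Char → Bool),
    cs.foldl pvAStep (tokens ++ [t], some f) =
      (tokens ++ (cs.foldl pvAStep ([t], some f)).1, (cs.foldl pvAStep ([t], some f)).2) := by
  induction cs with
  | nil => intro tokens t f; simp
  | cons c cs ih =>
    intro tokens t f
    simp only [List.foldl_cons, pvAStep_some]
    by_cases h : (pvOther c || !(f c)) = true
    · simp only [h, if_true]
      obtain ⟨g, hf⟩ := pvFirst_isSome c
      rw [hf, ih (tokens ++ [t]) [c] g, ih [t] [c] g]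
      simp
    · simp only [h, if_false]
      have hl : (tokens ++ [t]).dropLast ++ [(tokens ++ [t]).getLastD [] ++ [c]]
          = tokens ++ [t ++ [c]] := by
        simp [List.dropLast_concat, List.getLastD_concat]
      have hr : ([t] : List (List Char)).dropLast ++ [([t] : List (List Char)).getLastD [] ++ [c]]
          = [t ++ [c]] := by simp
      rw [hl, hr]
      exact ih tokens (t ++ [c]) f

-- A's fold from a fresh 'other' token: the next char always opens a new token
theorem pvGo (cs : List Char) (s : List Char) :
    (cs.foldl pvAStep ([s], some (fun x => !(PySem.Chars.isalpha x || PySem.Chars.isdigit x)))).1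
      = s :: pvF cs := by
  cases cs with
  | nil => simp [pvF]
  | cons c cs =>
    simp only [List.foldl_cons, pvAStep_some]
    have hc : (pvOther c || !((fun x => !(PySem.Chars.isalpha x || PySem.Chars.isdigit x)) c)) = true := by
      simp only [pvOther]
      by_cases h : (PySem.Chars.isalpha c || PySem.Chars.isdigit c) = true <;> simp_all
    rw [hc]
    simp only [if_true]
    obtain ⟨g, hf⟩ := pvFirst_isSome c
    rw [hf, pvA_prefix cs [s] [c] g]
    simp [pvF, List.foldl_cons, pvAStep_none, hf]

-- A's fold from a fresh alpha token: consume the maximal alpha run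
theorem pvGa (cs : List Char) : ∀ (s : List Char),
    (cs.foldl pvAStep ([s], some (fun x => PySem.Chars.isalpha x))).1
      = (s ++ cs.takeWhile (fun d => PySem.Chars.isalpha d)) ::
          pvF (cs.dropWhile (fun d => PySem.Chars.isalpha d)) := by
  induction cs with
  | nil => intro s; simp [pvF]
  | cons c cs ih =>
    intro s
    simp only [List.foldl_cons, pvAStep_some]
    by_cases h : PySem.Chars.isalpha c = true
    · have hc : (pvOther c || !((fun x => PySem.Chars.isalpha x) c)) = false := by
        simp [pvOther, h]
      rw [hc]
      simp only [Bool.false_eq_true, if_false]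
      have hs : ([s] : List (List Char)).dropLast ++ [([s] : List (List Char)).getLastD [] ++ [c]]
          = [s ++ [c]] := by simp
      rw [hs, ih (s ++ [c])]
      simp [List.takeWhile_cons, List.dropWhile_cons, h]
    · have hc : (pvOther c || !((fun x => PySem.Chars.isalpha x) c)) = true := by
        simp only [pvOther]; simp_all
      rw [hc]
      simp only [if_true]
      obtain ⟨g, hf⟩ := pvFirst_isSome c
      rw [hf, pvA_prefix cs [s] [c] g]
      simp [pvF, List.foldl_cons, pvAStep_none, hf, List.takeWhile_cons, List.dropWhile_cons, h]

-- A's fold from a fresh digit token: consume the maximal digit run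
theorem pvGd (cs : List Char) : ∀ (s : List Char),
    (cs.foldl pvAStep ([s], some (fun x => PySem.Chars.isdigit x))).1
      = (s ++ cs.takeWhile (fun d => PySem.Chars.isdigit d)) ::
          pvF (cs.dropWhile (fun d => PySem.Chars.isdigit d)) := by
  induction cs with
  | nil => intro s; simp [pvF]
  | cons c cs ih =>
    intro s
    simp only [List.foldl_cons, pvAStep_some]
    by_cases h : PySem.Chars.isdigit c = true
    · have hc : (pvOther c || !((fun x => PySem.Chars.isdigit x) c)) = false := by
        simp [pvOther, h]
      rw [hc]
      simp only [Bool.false_eq_true, if_false]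
      have hs : ([s] : List (List Char)).dropLast ++ [([s] : List (List Char)).getLastD [] ++ [c]]
          = [s ++ [c]] := by simp
      rw [hs, ih (s ++ [c])]
      simp [List.takeWhile_cons, List.dropWhile_cons, h]
    · have hc : (pvOther c || !((fun x => PySem.Chars.isdigit x) c)) = true := by
        simp only [pvOther]; simp_all
      rw [hc]
      simp only [if_true]
      obtain ⟨g, hf⟩ := pvFirst_isSome c
      rw [hf, pvA_prefix cs [s] [c] g]
      simp [pvF, List.foldl_cons, pvAStep_none, hf, List.takeWhile_cons, List.dropWhile_cons, h]

-- B side: the zip-with-keys list groups exactly along alpha runs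
theorem pvBa (cs : List Char) : ∀ (k : Int), k ≤ 0 →
    (cs.zip (pvBKeys cs k)).takeWhile (fun p => p.2 == (0 : Int))
        = (cs.takeWhile (fun d => PySem.Chars.isalpha d)).map (fun c => (c, (0 : Int)))
    ∧ (cs.zip (pvBKeys cs k)).dropWhile (fun p => p.2 == (0 : Int))
        = (cs.dropWhile (fun d => PySem.Chars.isalpha d)).zip
            (pvBKeys (cs.dropWhile (fun d => PySem.Chars.isalpha d)) k) := by
  induction cs with
  | nil => intro k hk; simp
  | cons c cs ih =>
    intro k hk
    by_cases h : PySem.Chars.isalpha c = true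
    · have := ih k hk
      simp [pvBKeys, h, List.takeWhile_cons, List.dropWhile_cons, this.1, this.2]
    · by_cases hd : PySem.Chars.isdigit c = true
      · simp [pvBKeys, h, hd, List.takeWhile_cons, List.dropWhile_cons]
      · have hne : ((k - 1 : Int) == (0 : Int)) = false := by
          simp; omega
        simp [pvBKeys, h, hd, List.takeWhile_cons, List.dropWhile_cons, hne]

theorem pvAlphaNotDigit (c : Char) (h : PySem.Chars.isalpha c = true) :
    PySem.Chars.isdigit c = false := by
  simp [PySem.Chars.isalpha, PySem.Chars.isdigit, PySem.Chars.isupper, PySem.Chars.islower,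
    Char.le_def, UInt32.le_iff_toNat_le] at *
  rcases h with h | h <;> omega

-- B side: the zip-with-keys list groups exactly along digit runs
theorem pvBd (cs : List Char) : ∀ (k : Int), k ≤ 0 →
    (cs.zip (pvBKeys cs k)).takeWhile (fun p => p.2 == (1 : Int))
        = (cs.takeWhile (fun d => PySem.Chars.isdigit d)).map (fun c => (c, (1 : Int)))
    ∧ (cs.zip (pvBKeys cs k)).dropWhile (fun p => p.2 == (1 : Int))
        = (cs.dropWhile (fun d => PySem.Chars.isdigit d)).zip
            (pvBKeys (cs.dropWhile (fun d => PySem.Chars.isdigit d)) k) := by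
  induction cs with
  | nil => intro k hk; simp
  | cons c cs ih =>
    intro k hk
    by_cases h : PySem.Chars.isalpha c = true
    · have hd := pvAlphaNotDigit c h
      simp [pvBKeys, h, hd, List.takeWhile_cons, List.dropWhile_cons]
    · by_cases hd : PySem.Chars.isdigit c = true
      · have := ih k hk
        simp [pvBKeys, h, hd, List.takeWhile_cons, List.dropWhile_cons, this.1, this.2]
      · have hne : ((k - 1 : Int) == (1 : Int)) = false := by
          simp; omega
        simp [pvBKeys, h, hd, List.takeWhile_cons, List.dropWhile_cons, hne]

-- B side: a fresh sentinel key never matches the next key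
theorem pvBo (cs : List Char) (k : Int) (hk : k ≤ 0) :
    (cs.zip (pvBKeys cs (k - 1))).takeWhile (fun p => p.2 == (k - 1 : Int)) = []
    ∧ (cs.zip (pvBKeys cs (k - 1))).dropWhile (fun p => p.2 == (k - 1 : Int))
        = cs.zip (pvBKeys cs (k - 1)) := by
  cases cs with
  | nil => simp
  | cons c cs =>
    by_cases h : PySem.Chars.isalpha c = true
    · have : ((0 : Int) == (k - 1 : Int)) = false := by simp; omega
      simp [pvBKeys, h, List.takeWhile_cons, List.dropWhile_cons, this]
    · by_cases hd : PySem.Chars.isdigit c = true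
      · have : ((1 : Int) == (k - 1 : Int)) = false := by simp; omega
        simp [pvBKeys, h, hd, List.takeWhile_cons, List.dropWhile_cons, this]
      · have : ((k - 1 - 1 : Int) == (k - 1 : Int)) = false := by simp
        simp [pvBKeys, h, hd, List.takeWhile_cons, List.dropWhile_cons, this]

-- main per-line equivalence
theorem pvMain : ∀ (n : Nat) (cs : List Char), cs.length ≤ n → ∀ (k : Int), k ≤ 0 →
    pvF cs = pvBGroup (cs.zip (pvBKeys cs k)) := by
  intro n
  induction n with
  | zero =>
    intro cs hcs k hk
    have : cs = [] := List.eq_nil_of_length_eq_zero (Nat.le_zero.mp hcs)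
    subst this; simp [pvF, pvBGroup]
  | succ n ih =>
    intro cs hcs k hk
    cases cs with
    | nil => simp [pvF, pvBGroup]
    | cons c cs =>
      have hlen : cs.length ≤ n := by simpa using hcs
      have hF : pvF (c :: cs) = (cs.foldl pvAStep ([[c]], pvFirst c)).1 := by
        simp [pvF, List.foldl_cons, pvAStep_none]
      by_cases h : PySem.Chars.isalpha c = true
      · rw [hF, pvFirst_alpha c h, pvGa cs [c]]
        have hB := pvBa cs k hk
        have hdl : (cs.dropWhile (fun d => PySem.Chars.isalpha d)).length ≤ n :=
          le_trans (List.length_dropWhile_le _ _) hlen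
        rw [show ((c :: cs).zip (pvBKeys (c :: cs) k)) = (c, (0:Int)) :: cs.zip (pvBKeys cs k) by
              simp [pvBKeys, h],
            pvBGroup, hB.1, hB.2, ← ih _ hdl k hk]
        simp [List.map_map, Function.comp_def]
      · by_cases hd : PySem.Chars.isdigit c = true
        · rw [hF, pvFirst_digit c (by simpa using h) hd, pvGd cs [c]]
          have hB := pvBd cs k hk
          have hdl : (cs.dropWhile (fun d => PySem.Chars.isdigit d)).length ≤ n :=
            le_trans (List.length_dropWhile_le _ _) hlen
          rw [show ((c :: cs).zip (pvBKeys (c :: cs) k)) = (c, (1:Int)) :: cs.zip (pvBKeys cs k) by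
                simp [pvBKeys, h, hd],
              pvBGroup, hB.1, hB.2, ← ih _ hdl k hk]
          simp [List.map_map, Function.comp_def]
        · rw [hF, pvFirst_other c (by simpa using h) (by simpa using hd), pvGo cs [c]]
          have hB := pvBo cs k hk
          have hk' : (k - 1 : Int) ≤ 0 := by omega
          rw [show ((c :: cs).zip (pvBKeys (c :: cs) k)) = (c, (k-1:Int)) :: cs.zip (pvBKeys cs (k-1)) by
                simp [pvBKeys, h, hd],
              pvBGroup, hB.1, hB.2, ← ih _ hlen (k - 1) hk']
          simp

-- the outer fold of A is a map
theorem pvFoldMap (g : String → List String) : ∀ (text : List String) (acc : List (List String)),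
    text.foldl (fun tl line => tl ++ [g line]) acc = acc ++ text.map g := by
  intro text
  induction text with
  | nil => intro acc; simp
  | cons l ls ih => intro acc; simp [List.foldl_cons, ih]

-- ===== VERDICT (by name: the statement is the Claim_ definition above) =====
theorem get_token_lines_py_spec : Claim_equal_get_token_lines_py := by
  intro text _
  unfold Spec_get_token_lines_py get_token_lines_py get_token_lines_py_alt
  rw [pvFoldMap]
  simp only [List.nil_append]
  apply List.map_congr_left
  intro line _
  have := pvMain line.toList.length line.toList le_rfl 0 le_rfl
  simp only [pvF] at this
  rw [this]
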